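-- pv_equiv track=rewrite | github.com/PWSdelta/pwsdelta | generate_translation.py | update_translation_histogram
-- ===== SOURCE A (Python) =====
-- def update_translation_histogram(all_results):
--     histogram = {
--         "japanese": {},
--         "jp_romaji": {},
--         "back_english": {}
--     }
--
--     for result in all_results:
--         japanese = result.get("japanese", "")
--         jp_romaji = result.get("jp_romaji", "")
--         back_english = result.get("back_english", "")
--
--         if japanese:
--             histogram["japanese"][japanese] = histogram["japanese"].get(japanese, 0) + 1
--         if jp_romaji:
--             histogram["jp_romaji"][jp_romaji] = histogram["jp_romaji"].get(jp_romaji, 0) + 1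
--         if back_english:
--             histogram["back_english"][back_english] = histogram["back_english"].get(back_english, 0) + 1
--
--     return histogram
-- ===== SOURCE B (Python) =====
-- def update_translation_histogram(all_results):
--     histogram = {}
--     for field in ("japanese", "jp_romaji", "back_english"):
--         counts = {}
--         for result in all_results:
--             value = result.get(field, "")
--             if value:
--                 counts[value] = counts.get(value, 0) + 1
--         histogram[field] = counts
--     return histogram
-- ===== Notes on version B (the rewrite author's own statement) =====
-- stated objective: alternative
-- what changed: B inverts the loop nesting: instead of one combined pass updating three inner dicts per record, it runs one separate counting pass over all_results for each field, building each field's histogram independently.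
import Mathlib
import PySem

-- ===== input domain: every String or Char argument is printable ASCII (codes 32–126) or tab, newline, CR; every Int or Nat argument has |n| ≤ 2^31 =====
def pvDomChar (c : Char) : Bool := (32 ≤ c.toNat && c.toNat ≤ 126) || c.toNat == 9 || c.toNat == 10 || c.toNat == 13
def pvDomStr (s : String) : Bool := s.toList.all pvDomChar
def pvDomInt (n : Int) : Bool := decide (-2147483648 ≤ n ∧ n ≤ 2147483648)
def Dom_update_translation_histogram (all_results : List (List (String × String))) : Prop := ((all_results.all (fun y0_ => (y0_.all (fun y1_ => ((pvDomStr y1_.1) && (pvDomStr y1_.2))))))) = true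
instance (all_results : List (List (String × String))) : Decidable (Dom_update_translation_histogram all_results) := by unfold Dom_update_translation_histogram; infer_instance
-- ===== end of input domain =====

-- B runs one separate counting pass over all_results per field instead of A's single
-- combined pass updating three dicts; same return value (alternative decomposition).

-- ===== PORT A =====
def update_translation_histogram (all_results : List (List (String × String))) : List (String × List (String × Int)) :=
  let h := all_results.foldl
    (fun (h : PySem.Dict String Int × PySem.Dict String Int × PySem.Dict String Int) result =>
      let japanese := (PySem.Dict.mk result).getD "japanese" ""
      let jp_romaji := (PySem.Dict.mk result).getD "jp_romaji" ""
      let back_english := (PySem.Dict.mk result).getD "back_english" ""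
      let h1 := if japanese ≠ "" then h.1.insert japanese (h.1.getD japanese 0 + 1) else h.1
      let h2 := if jp_romaji ≠ "" then h.2.1.insert jp_romaji (h.2.1.getD jp_romaji 0 + 1) else h.2.1
      let h3 := if back_english ≠ "" then h.2.2.insert back_english (h.2.2.getD back_english 0 + 1) else h.2.2
      (h1, h2, h3))
    (PySem.Dict.empty, PySem.Dict.empty, PySem.Dict.empty)
  [("japanese", h.1.items), ("jp_romaji", h.2.1.items), ("back_english", h.2.2.items)]

-- ===== PORT B =====
def pvCountField (field : String) (all_results : List (List (String × String))) : PySem.Dict String Int :=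
  all_results.foldl
    (fun counts result =>
      let value := (PySem.Dict.mk result).getD field ""
      if value ≠ "" then counts.insert value (counts.getD value 0 + 1) else counts)
    PySem.Dict.empty

def update_translation_histogram_alt (all_results : List (List (String × String))) : List (String × List (String × Int)) :=
  ["japanese", "jp_romaji", "back_english"].map
    (fun field => (field, (pvCountField field all_results).items))

-- ===== PRECONDITION & SPEC =====
def Spec_update_translation_histogram (all_results : List (List (String × String))) (out : List (String × List (String × Int))) : Prop := out = update_translation_histogram_alt all_results
instance (all_results : List (List (String × String))) (out : List (String × List (String × Int))) : Decidable (Spec_update_translation_histogram all_results out) := by unfold Spec_update_translation_histogram; infer_instance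

-- ===== CLAIM (what is proved, stated in full; the proofs are below) =====
def Claim_equal_update_translation_histogram : Prop := ∀ (all_results : List (List (String × String))), Dom_update_translation_histogram all_results → Spec_update_translation_histogram all_results (update_translation_histogram all_results)

-- ===== LEMMAS AND PROOFS =====

-- The combined triple fold of A equals the three independent single-field folds of B.
theorem pv_fold_split (l : List (List (String × String)))
    (a b c : PySem.Dict String Int) :
    l.foldl
      (fun (h : PySem.Dict String Int × PySem.Dict String Int × PySem.Dict String Int) result =>
        let japanese := (PySem.Dict.mk result).getD "japanese" ""
        let jp_romaji := (PySem.Dict.mk result).getD "jp_romaji" ""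
        let back_english := (PySem.Dict.mk result).getD "back_english" ""
        let h1 := if japanese ≠ "" then h.1.insert japanese (h.1.getD japanese 0 + 1) else h.1
        let h2 := if jp_romaji ≠ "" then h.2.1.insert jp_romaji (h.2.1.getD jp_romaji 0 + 1) else h.2.1
        let h3 := if back_english ≠ "" then h.2.2.insert back_english (h.2.2.getD back_english 0 + 1) else h.2.2
        (h1, h2, h3))
      (a, b, c)
    = (l.foldl (fun counts result =>
          let value := (PySem.Dict.mk result).getD "japanese" ""
          if value ≠ "" then counts.insert value (counts.getD value 0 + 1) else counts) a,
       l.foldl (fun counts result =>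
          let value := (PySem.Dict.mk result).getD "jp_romaji" ""
          if value ≠ "" then counts.insert value (counts.getD value 0 + 1) else counts) b,
       l.foldl (fun counts result =>
          let value := (PySem.Dict.mk result).getD "back_english" ""
          if value ≠ "" then counts.insert value (counts.getD value 0 + 1) else counts) c) := by
  induction l generalizing a b c with
  | nil => rfl
  | cons r t ih => simp only [List.foldl_cons]; exact ih _ _ _

-- ===== VERDICT (by name: the statement is the Claim_ definition above) =====
theorem update_translation_histogram_spec : Claim_equal_update_translation_histogram := by
  intro all_results _
  unfold Spec_update_translation_histogram update_translation_histogram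
    update_translation_histogram_alt pvCountField
  rw [pv_fold_split]
  rfl
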